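-- pv_equiv track=rewrite | github.com/A4Bio/GraphsGPT | data/tokenizer.py | _convert_graph_sequence_to_list
-- ===== SOURCE A (Python) =====
-- from typing import Tuple, List, Dict, Union, Optional
--
-- def _convert_graph_sequence_to_list(id_list, mask_list, connection_list) -> Tuple[List[int], List[int], List[int], List[int]]:
--     atom_and_bond_ids = id_list  # embedding ids for atom and bond features
--     identifier_ids = mask_list  # embedding ids for node and edge identifiers
--     graph_position_ids_1 = [0] * len(id_list)  # embedding ids for node and edge representation 1
--     graph_position_ids_2 = [0] * len(id_list)  # embedding ids for node and edge representation 2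
--
--     # fill "graph_position_ids_1" and "graph_position_ids_2"
--     now_node_id = 0
--     now_edge_id = 0
--
--     for i, identifier_id in enumerate(identifier_ids):
--         if identifier_id == 1:  # is a node
--             graph_position_ids_1[i] = now_node_id
--             graph_position_ids_2[i] = now_node_id
--             now_node_id += 1
--         else:  # is an edge
--             graph_position_ids_1[i] = connection_list[now_edge_id][0]
--             graph_position_ids_2[i] = connection_list[now_edge_id][1]
--             now_edge_id += 1
--
--     return atom_and_bond_ids, graph_position_ids_1, graph_position_ids_2, identifier_ids
-- ===== SOURCE B (Python) =====
-- def _convert_graph_sequence_to_list(id_list, mask_list, connection_list):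
--     # classify positions once, then fill nodes and edges in two separate passes
--     node_positions = [i for i, x in enumerate(mask_list) if x == 1]
--     edge_positions = [i for i, x in enumerate(mask_list) if x != 1]
--     graph_position_ids_1 = [0] * len(id_list)
--     graph_position_ids_2 = [0] * len(id_list)
--     for k, i in enumerate(node_positions):
--         graph_position_ids_1[i] = k
--         graph_position_ids_2[i] = k
--     for i, c in zip(edge_positions, connection_list):
--         graph_position_ids_1[i] = c[0]
--         graph_position_ids_2[i] = c[1]
--     return id_list, graph_position_ids_1, graph_position_ids_2, mask_list
-- ===== Notes on version B (the rewrite author's own statement) =====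
-- stated objective: alternative
-- what changed: Replaces A's single interleaved pass with running node/edge counters by a classify-then-fill decomposition: one pass partitions indices into node_positions/edge_positions, then nodes are filled by enumerating node_positions and edges by zipping edge_positions with connection_list.
import Mathlib
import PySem

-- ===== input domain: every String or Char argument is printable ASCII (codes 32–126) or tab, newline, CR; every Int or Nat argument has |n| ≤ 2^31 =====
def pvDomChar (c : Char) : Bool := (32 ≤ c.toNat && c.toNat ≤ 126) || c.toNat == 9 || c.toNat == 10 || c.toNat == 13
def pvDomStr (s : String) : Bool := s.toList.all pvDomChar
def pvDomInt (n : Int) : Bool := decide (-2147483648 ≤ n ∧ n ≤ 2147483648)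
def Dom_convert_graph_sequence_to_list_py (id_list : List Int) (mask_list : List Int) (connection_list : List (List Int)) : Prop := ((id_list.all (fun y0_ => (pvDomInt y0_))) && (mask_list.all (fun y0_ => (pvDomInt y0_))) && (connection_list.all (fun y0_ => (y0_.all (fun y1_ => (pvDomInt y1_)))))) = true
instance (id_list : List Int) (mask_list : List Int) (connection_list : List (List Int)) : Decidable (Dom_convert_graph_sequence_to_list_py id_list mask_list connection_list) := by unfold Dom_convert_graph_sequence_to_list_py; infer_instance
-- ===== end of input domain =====

-- B replaces A's interleaved counter loop by classify-then-fill (two separate fill passes); same cost, proved equal on Pre_.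

-- ===== PORT A =====
-- loop body of A's single pass; state = (g1, g2, now_node_id, now_edge_id)
-- connection_list[now_edge_id] is ported with getD / pyGetD: Pre_ excludes the inputs where Python raises IndexError
def stepA (conn : List (List Int)) (st : List Int × List Int × Int × Nat) (p : Int × Int) :
    List Int × List Int × Int × Nat :=
  if p.2 = 1 then
    (st.1.set p.1.toNat st.2.2.1, st.2.1.set p.1.toNat st.2.2.1, st.2.2.1 + 1, st.2.2.2)
  else
    let c := conn.getD st.2.2.2 []
    (st.1.set p.1.toNat (PySem.List.pyGetD c 0 0), st.2.1.set p.1.toNat (PySem.List.pyGetD c 1 0),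
     st.2.2.1, st.2.2.2 + 1)

def convert_graph_sequence_to_list_py (id_list : List Int) (mask_list : List Int) (connection_list : List (List Int)) : List Int × List Int × List Int × List Int :=
  let atom_and_bond_ids := id_list
  let identifier_ids := mask_list
  let graph_position_ids_1 := List.replicate id_list.length (0 : Int)
  let graph_position_ids_2 := List.replicate id_list.length (0 : Int)
  let st := (PySem.List.enumerate identifier_ids 0).foldl (stepA connection_list)
    (graph_position_ids_1, graph_position_ids_2, 0, 0)
  (atom_and_bond_ids, st.1, st.2.1, identifier_ids)

-- ===== PORT B =====
def fN (p : Int × Int) : Option Int := if p.2 = 1 then some p.1 else none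
def fE (p : Int × Int) : Option Int := if ¬ (p.2 = 1) then some p.1 else none
-- node fill step: p = (rank, position)
def stepN (st : List Int × List Int) (p : Int × Int) : List Int × List Int :=
  (st.1.set p.2.toNat p.1, st.2.set p.2.toNat p.1)
-- edge fill step: p = (position, connection row); c[0]/c[1] via pyGetD (Pre_ guarantees length ≥ 2)
def stepE (st : List Int × List Int) (p : Int × List Int) : List Int × List Int :=
  (st.1.set p.1.toNat (PySem.List.pyGetD p.2 0 0), st.2.set p.1.toNat (PySem.List.pyGetD p.2 1 0))

def convert_graph_sequence_to_list_py_alt (id_list : List Int) (mask_list : List Int) (connection_list : List (List Int)) : List Int × List Int × List Int × List Int :=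
  let node_positions := (PySem.List.enumerate mask_list 0).filterMap fN
  let edge_positions := (PySem.List.enumerate mask_list 0).filterMap fE
  let g1 := List.replicate id_list.length (0 : Int)
  let g2 := List.replicate id_list.length (0 : Int)
  let stN := (PySem.List.enumerate node_positions 0).foldl stepN (g1, g2)
  let stE := (edge_positions.zip connection_list).foldl stepE stN
  (id_list, stE.1, stE.2, mask_list)

-- ===== PRECONDITION & SPEC =====
-- Pre_ = exactly the inputs on which Python A returns: the loop never assigns past len(id_list)
-- (IndexError otherwise), connection_list has a row for every non-1 mask entry, and each used row
-- has length ≥ 2 (otherwise IndexError on connection_list[now_edge_id][0]/[1]).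
def Pre_convert_graph_sequence_to_list_py (id_list : List Int) (mask_list : List Int) (connection_list : List (List Int)) : Prop :=
  mask_list.length ≤ id_list.length ∧
  mask_list.countP (fun x => decide (x ≠ 1)) ≤ connection_list.length ∧
  ∀ c ∈ connection_list.take (mask_list.countP (fun x => decide (x ≠ 1))), 2 ≤ c.length
instance (id_list : List Int) (mask_list : List Int) (connection_list : List (List Int)) : Decidable (Pre_convert_graph_sequence_to_list_py id_list mask_list connection_list) := by unfold Pre_convert_graph_sequence_to_list_py; infer_instance

def pvWitness_convert_graph_sequence_to_list_py : List Int × List Int × List (List Int) :=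
  ([5, 6, 7], [1, 2, 1], [[0, 1]])

def Spec_convert_graph_sequence_to_list_py (id_list : List Int) (mask_list : List Int) (connection_list : List (List Int)) (out : List Int × List Int × List Int × List Int) : Prop := out = convert_graph_sequence_to_list_py_alt id_list mask_list connection_list
instance (id_list : List Int) (mask_list : List Int) (connection_list : List (List Int)) (out : List Int × List Int × List Int × List Int) : Decidable (Spec_convert_graph_sequence_to_list_py id_list mask_list connection_list out) := by unfold Spec_convert_graph_sequence_to_list_py; infer_instance

-- ===== CLAIM (what is proved, stated in full; the proofs are below) =====
def Claim_equal_convert_graph_sequence_to_list_py : Prop := ∀ (id_list : List Int) (mask_list : List Int) (connection_list : List (List Int)), Dom_convert_graph_sequence_to_list_py id_list mask_list connection_list → Pre_convert_graph_sequence_to_list_py id_list mask_list connection_list → Spec_convert_graph_sequence_to_list_py id_list mask_list connection_list (convert_graph_sequence_to_list_py id_list mask_list connection_list)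

-- ===== LEMMAS AND PROOFS =====

-- apply a list of updates (index, value-for-g1, value-for-g2) to a pair of lists
def upd2 (st : List Int × List Int) (us : List (Nat × Int × Int)) : List Int × List Int :=
  us.foldl (fun st u => (st.1.set u.1 u.2.1, st.2.set u.1 u.2.2)) st

-- the updates A's pass performs, starting at position k with counters a (node) and b (edge)
def updsA (conn : List (List Int)) : Nat → Int → Nat → List Int → List (Nat × Int × Int)
  | _, _, _, [] => []
  | k, a, b, x :: t =>
    if x = 1 then (k, a, a) :: updsA conn (k + 1) (a + 1) b t
    else
      (k, PySem.List.pyGetD (conn.getD b []) 0 0, PySem.List.pyGetD (conn.getD b []) 1 0) ::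
        updsA conn (k + 1) a (b + 1) t

-- the updates of B's node pass / edge pass
def nodesU : Nat → Nat → List Int → List (Nat × Int × Int)
  | _, _, [] => []
  | k, a, x :: t => if x = 1 then (k, (a : Int), (a : Int)) :: nodesU (k + 1) (a + 1) t else nodesU (k + 1) a t

def cntE : List Int → Nat
  | [] => 0
  | x :: t => (if x = 1 then 0 else 1) + cntE t

def edgesU (conn : List (List Int)) : Nat → Nat → List Int → List (Nat × Int × Int)
  | _, _, [] => []
  | k, b, x :: t =>
    if x = 1 then edgesU conn (k + 1) b t
    else
      (k, PySem.List.pyGetD (conn.getD b []) 0 0, PySem.List.pyGetD (conn.getD b []) 1 0) ::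
        edgesU conn (k + 1) (b + 1) t

theorem cntE_eq : ∀ ms : List Int, cntE ms = ms.countP (fun x => decide (x ≠ 1)) := by
  intro ms
  induction ms with
  | nil => simp [cntE]
  | cons x t ih => by_cases hx : x = 1 <;> simp [cntE, hx, ih, List.countP_cons] <;> omega

theorem A_fold (conn : List (List Int)) : ∀ (ms : List Int) (k : Nat) (a : Int) (b : Nat) (g : List Int × List Int),
    ∃ a' b', (PySem.List.enumerate ms (k : Int)).foldl (stepA conn) (g.1, g.2, a, b)
      = ((upd2 g (updsA conn k a b ms)).1, (upd2 g (updsA conn k a b ms)).2, a', b') := by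
  intro ms
  induction ms with
  | nil => intro k a b g; exact ⟨a, b, by simp [PySem.List.enumerate, updsA, upd2]⟩
  | cons x t ih =>
    intro k a b g
    have hc : ((k : Int) + 1) = ((k + 1 : Nat) : Int) := by push_cast; ring
    rw [PySem.List.enumerate_cons, hc]
    by_cases hx : x = 1
    · simpa [List.foldl_cons, stepA, hx, updsA, upd2] using ih (k+1) (a+1) b (g.1.set k a, g.2.set k a)
    · simpa [List.foldl_cons, stepA, hx, updsA, upd2] using
        ih (k+1) a (b+1)
          (g.1.set k (PySem.List.pyGetD (conn.getD b []) 0 0), g.2.set k (PySem.List.pyGetD (conn.getD b []) 1 0))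

theorem B_nodes : ∀ (ms : List Int) (k a : Nat) (st : List Int × List Int),
    (PySem.List.enumerate ((PySem.List.enumerate ms (k : Int)).filterMap fN) (a : Int)).foldl stepN st
      = upd2 st (nodesU k a ms) := by
  intro ms
  induction ms with
  | nil => intro k a st; simp [PySem.List.enumerate, nodesU, upd2]
  | cons x t ih =>
    intro k a st
    have hck : ((k : Int) + 1) = ((k + 1 : Nat) : Int) := by push_cast; ring
    have hca : ((a : Int) + 1) = ((a + 1 : Nat) : Int) := by push_cast; ring
    rw [PySem.List.enumerate_cons, hck]
    by_cases hx : x = 1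
    · rw [List.filterMap_cons]
      have hfn : fN ((k : Int), x) = some (k : Int) := by simp [fN, hx]
      rw [hfn, PySem.List.enumerate_cons, hca]
      simpa [List.foldl_cons, stepN, nodesU, hx, upd2] using ih (k+1) (a+1) (st.1.set k a, st.2.set k a)
    · rw [List.filterMap_cons]
      have hfn : fN ((k : Int), x) = none := by simp [fN, hx]
      rw [hfn]
      simpa [nodesU, hx, upd2] using ih (k+1) a st

theorem B_edges (conn : List (List Int)) : ∀ (ms : List Int) (k b : Nat) (st : List Int × List Int),
    b + cntE ms ≤ conn.length →
    (((PySem.List.enumerate ms (k : Int)).filterMap fE).zip (conn.drop b)).foldl stepE st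
      = upd2 st (edgesU conn k b ms) := by
  intro ms
  induction ms with
  | nil => intro k b st _; simp [PySem.List.enumerate, edgesU, upd2]
  | cons x t ih =>
    intro k b st h
    have hck : ((k : Int) + 1) = ((k + 1 : Nat) : Int) := by push_cast; ring
    rw [PySem.List.enumerate_cons, hck]
    by_cases hx : x = 1
    · rw [List.filterMap_cons]
      have hfe : fE ((k : Int), x) = none := by simp [fE, hx]
      rw [hfe]
      have h' : b + cntE t ≤ conn.length := by
        simp [cntE, hx] at h; omega
      simpa [edgesU, hx] using ih (k+1) b st h'
    · rw [List.filterMap_cons]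
      have hfe : fE ((k : Int), x) = some (k : Int) := by simp [fE, hx]
      rw [hfe]
      have hb : b < conn.length := by simp [cntE, hx] at h; omega
      have hdrop : conn.drop b = conn[b] :: conn.drop (b+1) := List.drop_eq_getElem_cons hb
      have hgd : conn.getD b [] = conn[b] := List.getD_eq_getElem conn [] hb
      rw [hdrop, List.zip_cons_cons]
      have h' : (b+1) + cntE t ≤ conn.length := by
        simp [cntE, hx] at h; omega
      simpa [List.foldl_cons, stepE, edgesU, hx, upd2, hgd, List.getElem?_eq_getElem hb] using
        ih (k+1) (b+1) (st.1.set k (PySem.List.pyGetD conn[b] 0 0), st.2.set k (PySem.List.pyGetD conn[b] 1 0)) h'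

theorem updsA_lb (conn : List (List Int)) : ∀ (ms : List Int) (k : Nat) (a : Int) (b : Nat),
    ∀ u ∈ updsA conn k a b ms, k ≤ u.1 := by
  intro ms
  induction ms with
  | nil => intro k a b u hu; simp [updsA] at hu
  | cons x t ih =>
    intro k a b u hu
    by_cases hx : x = 1 <;> simp [updsA, hx] at hu <;>
      rcases hu with h | h <;> first
        | (subst h; simp)
        | (have := ih (k+1) _ _ u h; omega)

theorem updsA_pairwise (conn : List (List Int)) : ∀ (ms : List Int) (k : Nat) (a : Int) (b : Nat),
    (updsA conn k a b ms).Pairwise (fun u v => u.1 < v.1) := by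
  intro ms
  induction ms with
  | nil => intro k a b; simp [updsA]
  | cons x t ih =>
    intro k a b
    by_cases hx : x = 1 <;> simp only [updsA, hx, if_true, if_false, reduceIte] <;>
      refine List.Pairwise.cons (fun v hv => ?_) (ih _ _ _) <;>
      · have := updsA_lb conn t (k+1) _ _ v hv; simpa using by omega

theorem updsA_perm (conn : List (List Int)) : ∀ (ms : List Int) (k : Nat) (a : Nat) (b : Nat),
    (updsA conn k (a : Int) b ms).Perm (nodesU k a ms ++ edgesU conn k b ms) := by
  intro ms
  induction ms with
  | nil => intro k a b; simp [updsA, nodesU, edgesU]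
  | cons x t ih =>
    intro k a b
    by_cases hx : x = 1
    · simp only [updsA, nodesU, edgesU, hx, reduceIte]
      have hca : ((a : Int) + 1) = ((a + 1 : Nat) : Int) := by push_cast; ring
      rw [List.cons_append, hca]
      exact List.Perm.cons _ (ih (k+1) (a+1) b)
    · simp only [updsA, nodesU, edgesU, hx, reduceIte]
      refine ((ih (k+1) a (b+1)).cons _).trans ?_
      exact List.perm_middle.symm

theorem upd2_perm (st : List Int × List Int) {us vs : List (Nat × Int × Int)}
    (hp : us.Perm vs) (hpw : us.Pairwise (fun u v => u.1 < v.1)) : upd2 st us = upd2 st vs := by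
  unfold upd2
  refine hp.foldl_eq' (fun u hu v hv z => ?_) st
  by_cases huv : u = v
  · subst huv; rfl
  · have hne : u.1 ≠ v.1 := by
      have hpw' : us.Pairwise (fun u v : Nat × Int × Int => u.1 ≠ v.1) :=
        hpw.imp (fun h => Nat.ne_of_lt h)
      exact hpw'.forall (fun a b h => h.symm) hu hv huv
    exact Prod.ext (List.set_comm _ _ hne) (List.set_comm _ _ hne)

theorem upd2_append (st : List Int × List Int) (us vs : List (Nat × Int × Int)) :
    upd2 st (us ++ vs) = upd2 (upd2 st us) vs := by
  unfold upd2; exact List.foldl_append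

-- ===== VERDICT (by name: the statement is the Claim_ definition above) =====
theorem convert_graph_sequence_to_list_py_spec : Claim_equal_convert_graph_sequence_to_list_py := by
  intro id_list mask_list connection_list _ hpre
  obtain ⟨h1, h2, h3⟩ := hpre
  unfold Spec_convert_graph_sequence_to_list_py
  simp only [convert_graph_sequence_to_list_py, convert_graph_sequence_to_list_py_alt]
  set g : List Int × List Int :=
    (List.replicate id_list.length (0 : Int), List.replicate id_list.length (0 : Int)) with hg
  obtain ⟨a', b', hA⟩ := A_fold connection_list mask_list 0 0 0 g
  have hB1 := B_nodes mask_list 0 0 g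
  have hcnt : (0 : Nat) + cntE mask_list ≤ connection_list.length := by
    rw [cntE_eq]; omega
  have hB2 := B_edges connection_list mask_list 0 0 (upd2 g (nodesU 0 0 mask_list)) hcnt
  have hperm : upd2 g (updsA connection_list 0 0 0 mask_list)
      = upd2 g (nodesU 0 0 mask_list ++ edgesU connection_list 0 0 mask_list) := by
    have hp := updsA_perm connection_list mask_list 0 0 0
    have hpw := updsA_pairwise connection_list mask_list 0 0 0
    simpa using upd2_perm g (by simpa using hp) hpw
  simp only [Nat.cast_zero, List.drop_zero] at hA hB1 hB2
  rw [hA, hB1, hB2, ← upd2_append, ← hperm]
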